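-- pv_equiv track=rewrite | github.com/MrBrantCode/unitest_baseline | mut_generate/mist_train_taco/taco_9689/solution.py | optimal_game_score
-- ===== SOURCE A (Python) =====
-- def optimal_game_score(t, matrices):
--     results = []
--     inf = 100000000000000000
--
--     for matrix in matrices:
--         n = len(matrix[0])
--         l1 = matrix[0]
--         l2 = matrix[1]
--
--         suff1 = [l1[-1]]
--         for i in range(n - 2, -1, -1):
--             suff1.append(l1[i] + suff1[-1])
--         suff1 = suff1[::-1]
--
--         pre2 = [l2[0]]
--         for i in range(1, n):
--             pre2.append(l2[i] + pre2[-1])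
--
--         mini = inf
--         for i in range(n):
--             val1 = suff1[i] - l1[i]
--             val2 = pre2[i] - l2[i]
--             mini = min(mini, max(val1, val2))
--
--         results.append(mini)
--
--     return results
-- ===== SOURCE B (Python) =====
-- def _score(m):
--     l1, l2 = m[0], m[1]
--     rem1 = sum(l1)
--     cum2 = 0
--     best = 100000000000000000
--     for a, b in zip(l1, l2):
--         rem1 -= a
--         best = min(best, max(rem1, cum2))
--         cum2 += b
--     return best
--
--
-- def optimal_game_score(t, matrices):
--     return [_score(m) for m in matrices]
-- ===== Notes on version B (the rewrite author's own statement) =====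
-- stated objective: simpler
-- what changed: Replaces A's three per-matrix passes (building a suffix-sum array, a prefix-sum array, then a min/max scan over both) with a single pass over zip(l1, l2) that maintains a running remaining-sum of l1 and running prefix-sum of l2, so no auxiliary arrays are built.
import Mathlib
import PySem

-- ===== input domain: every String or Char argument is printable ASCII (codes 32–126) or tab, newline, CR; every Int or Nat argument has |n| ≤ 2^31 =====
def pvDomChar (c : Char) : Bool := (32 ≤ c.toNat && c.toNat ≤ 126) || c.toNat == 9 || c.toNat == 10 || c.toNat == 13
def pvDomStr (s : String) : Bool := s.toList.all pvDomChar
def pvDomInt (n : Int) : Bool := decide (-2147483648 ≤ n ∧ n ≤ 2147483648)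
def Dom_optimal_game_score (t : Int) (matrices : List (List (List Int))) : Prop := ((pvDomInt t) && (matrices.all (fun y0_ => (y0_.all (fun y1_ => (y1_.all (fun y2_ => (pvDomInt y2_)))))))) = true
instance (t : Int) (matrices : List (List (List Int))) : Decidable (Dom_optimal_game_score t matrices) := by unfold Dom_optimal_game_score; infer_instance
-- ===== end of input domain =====

-- B fuses A's three per-matrix passes (suffix-sum array, prefix-sum array, min/max scan)
-- into one running-sum pass with no auxiliary arrays (objective: simpler).

-- ===== PORT A =====
-- per-matrix body of A's outer loop, transliterated line by line
def pvAmat (matrix : List (List Int)) : Int :=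
  let inf : Int := 100000000000000000
  let n : Int := ((PySem.List.pyGetD matrix 0 ([] : List Int)).length : Int)
  let l1 := PySem.List.pyGetD matrix 0 ([] : List Int)
  let l2 := PySem.List.pyGetD matrix 1 ([] : List Int)
  let suff1r := (PySem.List.pyRange (n - 2) (-1) (-1)).foldl
      (fun s i => s ++ [PySem.List.pyGetD l1 i 0 + PySem.List.pyGetD s (-1) 0])
      [PySem.List.pyGetD l1 (-1) 0]
  let suff1 := (PySem.List.slice? suff1r none none (-1)).getD []
  let pre2 := (PySem.List.pyRange 1 n 1).foldl
      (fun s i => s ++ [PySem.List.pyGetD l2 i 0 + PySem.List.pyGetD s (-1) 0])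
      [PySem.List.pyGetD l2 0 0]
  (PySem.List.pyRange 0 n 1).foldl
      (fun mini i =>
        min mini (max (PySem.List.pyGetD suff1 i 0 - PySem.List.pyGetD l1 i 0)
                      (PySem.List.pyGetD pre2 i 0 - PySem.List.pyGetD l2 i 0)))
      inf

def optimal_game_score (t : Int) (matrices : List (List (List Int))) : List Int :=
  matrices.foldl (fun results matrix => results ++ [pvAmat matrix]) []

-- ===== PORT B =====
-- _score from Source B: single pass over zip(l1, l2) with state (rem1, cum2, best)
def pvBscore (m : List (List Int)) : Int :=
  let l1 := PySem.List.pyGetD m 0 ([] : List Int)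
  let l2 := PySem.List.pyGetD m 1 ([] : List Int)
  ((l1.zip l2).foldl
      (fun (st : Int × Int × Int) p =>
        (st.1 - p.1, st.2.1 + p.2, min st.2.2 (max (st.1 - p.1) st.2.1)))
      (l1.sum, 0, 100000000000000000)).2.2

def optimal_game_score_alt (t : Int) (matrices : List (List (List Int))) : List Int :=
  matrices.map pvBscore

-- ===== PRECONDITION & SPEC =====
-- A raises IndexError when a matrix has fewer than 2 rows, when its first row is empty
-- (l1[-1]), or when the second row is shorter than the first (l2[i]); Pre_ excludes exactly those.
def Pre_optimal_game_score (t : Int) (matrices : List (List (List Int))) : Prop :=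
  ∀ m ∈ matrices, 2 ≤ m.length ∧ m.headD [] ≠ [] ∧
    (m.headD []).length ≤ (m.tail.headD []).length
instance (t : Int) (matrices : List (List (List Int))) : Decidable (Pre_optimal_game_score t matrices) := by
  unfold Pre_optimal_game_score; infer_instance

def pvWitness_optimal_game_score : Int × List (List (List Int)) :=
  (1, [[[3, 1, 2], [5, 2, 4]], [[7], [1, 2]]])

def Spec_optimal_game_score (t : Int) (matrices : List (List (List Int))) (out : List Int) : Prop := out = optimal_game_score_alt t matrices
instance (t : Int) (matrices : List (List (List Int))) (out : List Int) : Decidable (Spec_optimal_game_score t matrices out) := by unfold Spec_optimal_game_score; infer_instance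

-- ===== CLAIM (what is proved, stated in full; the proofs are below) =====
def Claim_equal_optimal_game_score : Prop := ∀ (t : Int) (matrices : List (List (List Int))), Dom_optimal_game_score t matrices → Pre_optimal_game_score t matrices → Spec_optimal_game_score t matrices (optimal_game_score t matrices)

-- ===== LEMMAS AND PROOFS =====

-- A's first inner loop builds [T(n-1), ..., T(0)] where T k = (l1.drop k).sum
lemma pv_loopA (l1 : List Int) : ∀ (m : Nat), m ≤ l1.length → ∀ (acc : List Int) (h : acc ≠ []),
    acc.getLast h = (l1.drop m).sum →
    (PySem.List.pyRange ((m : Int) - 1) (-1) (-1)).foldl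
      (fun s i => s ++ [PySem.List.pyGetD l1 i 0 + PySem.List.pyGetD s (-1) 0]) acc
    = acc ++ (List.range m).map (fun k => (l1.drop (m - 1 - k)).sum) := by
  intro m
  induction m with
  | zero =>
    intro _ acc h _
    rw [PySem.List.pyRange_neg_one_eq_nil (by norm_num)]
    simp
  | succ m ih =>
    intro hm acc h hlast
    have hmlt : m < l1.length := by omega
    have hcast : ((m + 1 : Nat) : Int) - 1 = (m : Int) := by push_cast; ring
    rw [hcast, PySem.List.pyRange_neg_one_cons (by omega)]
    rw [List.foldl_cons]
    have hget : PySem.List.pyGetD l1 (m : Int) 0 = l1[m] := by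
      simp [PySem.List.pyGetD_natCast, List.getD_eq_getElem?_getD, hmlt]
    have hlastv : PySem.List.pyGetD acc (-1) 0 = (l1.drop (m + 1)).sum := by
      rw [PySem.List.pyGetD_neg_one acc 0 h, hlast]
    have hsum : l1[m] + (l1.drop (m + 1)).sum = (l1.drop m).sum := by
      rw [List.drop_eq_getElem_cons hmlt, List.sum_cons]
    have hstep : acc ++ [PySem.List.pyGetD l1 (m : Int) 0 + PySem.List.pyGetD acc (-1) 0]
        = acc ++ [(l1.drop m).sum] := by rw [hget, hlastv, hsum]
    rw [hstep]
    have hne : acc ++ [(l1.drop m).sum] ≠ [] := by simp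
    have := ih (by omega) (acc ++ [(l1.drop m).sum]) hne (by simp)
    rw [this, List.append_assoc]
    congr 1
    rw [List.range_succ_eq_map]
    simp only [List.map_cons, List.map_map, List.cons_append]
    simp only [List.nil_append]
    congr 1
    apply List.map_congr_left
    intro a _
    show (l1.drop (m - 1 - a)).sum = (l1.drop (m + 1 - 1 - (a + 1))).sum
    congr 2
    omega

-- reversing [f(n-2-k) | k < n-1] and appending f(n-1) yields [f k | k < n]
lemma pv_rev_map (n : Nat) (f : Nat → Int) (h : 1 ≤ n) :
    ((List.range (n - 1)).map (fun k => f (n - 2 - k))).reverse ++ [f (n - 1)]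
    = (List.range n).map f := by
  apply List.ext_getElem
  · simp; omega
  · intro i h1 h2
    simp only [List.length_append, List.length_reverse, List.length_map, List.length_range,
      List.length_cons, List.length_nil] at h1
    rcases lt_or_ge i (n - 1) with hi | hi
    · rw [List.getElem_append_left (by simpa using hi)]
      rw [List.getElem_reverse, List.getElem_map, List.getElem_range, List.getElem_map,
        List.getElem_range]
      congr 1
      simp only [List.length_map, List.length_range]
      omega
    · have : i = n - 1 := by omega
      subst this
      rw [List.getElem_append_right (by simp)]
      simp only [List.length_reverse, List.length_map, List.length_range]
      rw [List.getElem_map, List.getElem_range]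
      simp

-- A's second inner loop builds the inclusive prefix sums of l2
lemma pv_loopP (l2 : List Int) : ∀ (n : Nat), 1 ≤ n → n ≤ l2.length →
    (PySem.List.pyRange 1 (n : Int) 1).foldl
      (fun s i => s ++ [PySem.List.pyGetD l2 i 0 + PySem.List.pyGetD s (-1) 0])
      [l2.getD 0 0]
    = (List.range n).map (fun k => (l2.take (k + 1)).sum) := by
  intro n
  induction n with
  | zero => omega
  | succ n ih =>
    intro _ hn
    rcases Nat.eq_zero_or_pos n with hn0 | hn1
    · subst hn0
      rw [PySem.List.pyRange_one_eq_nil (by norm_num)]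
      rcases l2 with _ | ⟨x, l2'⟩
      · simp at hn
      · simp
    · have hcast : ((n + 1 : Nat) : Int) = (n : Int) + 1 := by push_cast; ring
      rw [hcast, PySem.List.pyRange_one_succ_right (by omega), List.foldl_append,
        ih hn1 (by omega), List.foldl_cons, List.foldl_nil]
      have hlt : n < l2.length := by omega
      have hget : PySem.List.pyGetD l2 (n : Int) 0 = l2[n] := by
        simp [PySem.List.pyGetD_natCast, List.getD_eq_getElem?_getD, hlt]
      have hmapne : (List.range n).map (fun k => (l2.take (k + 1)).sum) ≠ [] := by
        simp; omega
      have hlast : PySem.List.pyGetD ((List.range n).map (fun k => (l2.take (k + 1)).sum)) (-1) 0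
          = (l2.take n).sum := by
        rw [PySem.List.pyGetD_neg_one _ 0 hmapne, List.getLast_eq_getElem,
          List.getElem_map, List.getElem_range]
        simp only [List.length_map, List.length_range]
        congr 2
        omega
      rw [hget, hlast]
      have htake : (l2.take (n + 1)).sum = (l2.take n).sum + l2[n] := by
        rw [List.take_add_one, List.sum_append]
        simp [List.getElem?_eq_getElem hlt]
      rw [List.range_succ, List.map_append]
      simp [htake]
      ring
lemma pv_foldB (l1 : List Int) : ∀ (l2 : List Int), l1.length ≤ l2.length → ∀ (c b : Int),
    ((l1.zip l2).foldl
      (fun (st : Int × Int × Int) p =>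
        (st.1 - p.1, st.2.1 + p.2, min st.2.2 (max (st.1 - p.1) st.2.1)))
      (l1.sum, c, b)).2.2
    = (List.range l1.length).foldl
        (fun m k => min m (max ((l1.drop (k + 1)).sum) (c + (l2.take k).sum))) b := by
  induction l1 with
  | nil => intro l2 _ c b; simp
  | cons a l1' ih =>
    intro l2 hlen c b
    rcases l2 with _ | ⟨x, l2'⟩
    · simp at hlen
    · simp only [List.zip_cons_cons, List.foldl_cons, List.sum_cons]
      have hst : ((a + l1'.sum) - a, c + x,
          min b (max ((a + l1'.sum) - a) c)) = (l1'.sum, c + x, min b (max l1'.sum c)) := by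
        simp
      rw [hst, ih l2' (by simpa using hlen) (c + x) (min b (max l1'.sum c))]
      rw [List.length_cons, List.range_succ_eq_map, List.foldl_cons, List.foldl_map]
      simp only [List.drop_succ_cons, List.drop_zero, List.take_zero, List.sum_nil, add_zero,
        List.take_succ_cons, List.sum_cons]
      apply List.foldl_ext
      intro m k _
      congr 2
      ring

-- per-matrix agreement of the two ports under the precondition
lemma pv_mat_eq (m : List (List Int)) (h2 : 2 ≤ m.length) (h1 : m.headD [] ≠ [])
    (hle : (m.headD []).length ≤ (m.tail.headD []).length) :
    pvAmat m = pvBscore m := by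
  rcases m with _ | ⟨l1, m'⟩; · simp at h2
  rcases m' with _ | ⟨l2, rest⟩; · simp at h2
  simp only [List.headD_cons, List.tail_cons] at h1 hle
  have hlen : 1 ≤ l1.length := by
    rcases l1 with _ | _; · simp at h1
    · simp
  unfold pvAmat pvBscore
  simp only [PySem.List.pyGetD_ofNat', List.getD_cons_succ, List.getD_cons_zero]
  have hnegget : PySem.List.pyGetD l1 (-1) 0 = (l1.drop (l1.length - 1)).sum := by
    rw [PySem.List.pyGetD_neg_one l1 0 h1,
      List.drop_length_sub_one h1, List.sum_cons, List.sum_nil, add_zero]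
  rw [hnegget]
  -- suff1r
  have hcast : (((l1.length - 1 : Nat)) : Int) - 1 = (l1.length : Int) - 2 := by omega
  have hsuff1r := pv_loopA l1 (l1.length - 1) (by omega) [(l1.drop (l1.length - 1)).sum]
    (by simp) (by simp)
  rw [hcast] at hsuff1r
  rw [hsuff1r, PySem.List.slice?_none_none_neg_one, Option.getD_some, List.reverse_append,
    List.reverse_singleton]
  have hmap : (fun k => (l1.drop (l1.length - 1 - 1 - k)).sum)
      = (fun k => (l1.drop (l1.length - 2 - k)).sum) := by
    funext k
    have h12 : l1.length - 1 - 1 - k = l1.length - 2 - k := by omega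
    rw [h12]
  rw [hmap, pv_rev_map l1.length (fun k => (l1.drop k).sum) hlen]
  -- pre2
  rw [pv_loopP l2 l1.length hlen hle]
  -- B side
  rw [pv_foldB l1 l2 hle 0 100000000000000000]
  -- mini loop
  rw [PySem.List.pyRange_zero_nat l1.length, List.foldl_map]
  apply List.foldl_ext
  intro acc k hk
  rw [List.mem_range] at hk
  have hk2 : k < l2.length := by omega
  rw [PySem.List.pyGetD_natCast, PySem.List.pyGetD_natCast, PySem.List.pyGetD_natCast,
    PySem.List.pyGetD_natCast]
  rw [PySem.List.getD_map_range _ _ _ _ hk, PySem.List.getD_map_range _ _ _ _ hk]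
  rw [List.getD_eq_getElem?_getD, List.getElem?_eq_getElem hk, Option.getD_some,
    List.getD_eq_getElem?_getD, List.getElem?_eq_getElem hk2, Option.getD_some]
  have hdropk : (l1.drop k).sum = l1[k] + (l1.drop (k + 1)).sum := by
    rw [List.drop_eq_getElem_cons hk, List.sum_cons]
  have htakek : (l2.take (k + 1)).sum = (l2.take k).sum + l2[k] := by
    rw [List.take_add_one, List.sum_append]
    simp [List.getElem?_eq_getElem hk2]
  congr 1
  congr 1
  · rw [hdropk]; ring
  · rw [htakek]; ring

-- ===== VERDICT (by name: the statement is the Claim_ definition above) =====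
theorem optimal_game_score_spec : Claim_equal_optimal_game_score := by
  intro t matrices _ hpre
  unfold Spec_optimal_game_score optimal_game_score optimal_game_score_alt
  rw [PySem.List.foldl_append_singleton_eq_map]
  exact List.map_congr_left fun m hm =>
    pv_mat_eq m (hpre m hm).1 (hpre m hm).2.1 (hpre m hm).2.2
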